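-- pv_equiv track=rewrite | github.com/inhahe/GPDA | gpda_scannerless.py | _decompose_same_tier
-- ===== SOURCE A (Python) =====
-- def _decompose_same_tier(lo_bytes, hi_bytes):
--     """Decompose a same-length byte range into a list of byte-range
--     alternatives.  Each alternative is a list of ``(byte_lo, byte_hi)``
--     describing a contiguous run of byte sequences of this length."""
--     assert len(lo_bytes) == len(hi_bytes)
--     n = len(lo_bytes)
--     if n == 1:
--         return [[(lo_bytes[0], hi_bytes[0])]]
--     if lo_bytes[0] == hi_bytes[0]:
--         sub = _decompose_same_tier(lo_bytes[1:], hi_bytes[1:])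
--         return [[(lo_bytes[0], lo_bytes[0])] + r for r in sub]
--     out = []
--     # Low-edge: fixed first byte = lo_bytes[0], tail goes from lo_bytes[1:]
--     # up to [0xBF]*(n-1).
--     sub = _decompose_same_tier(lo_bytes[1:], [0xBF] * (n - 1))
--     out.extend([[(lo_bytes[0], lo_bytes[0])] + r for r in sub])
--     # Middle: first byte in (lo_bytes[0]+1, hi_bytes[0]-1), all tails
--     # spanning full continuation range.
--     if hi_bytes[0] > lo_bytes[0] + 1:
--         out.append([(lo_bytes[0] + 1, hi_bytes[0] - 1)]
--                    + [(0x80, 0xBF)] * (n - 1))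
--     # High-edge: fixed first byte = hi_bytes[0], tail from [0x80]*(n-1)
--     # to hi_bytes[1:].
--     sub = _decompose_same_tier([0x80] * (n - 1), hi_bytes[1:])
--     out.extend([[(hi_bytes[0], hi_bytes[0])] + r for r in sub])
--     return out
-- ===== SOURCE B (Python) =====
-- def _decompose_same_tier(lo_bytes, hi_bytes):
--     """Iterative re-implementation: explicit stack of (lo, hi, prefix) frames
--     instead of recursion; frames are pushed in reverse so the emission order
--     matches the recursive depth-first order."""
--     assert len(lo_bytes) == len(hi_bytes)
--     out = []
--     stack = [(list(lo_bytes), list(hi_bytes), [])]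
--     while stack:
--         lo, hi, pre = stack.pop()
--         if not lo:
--             # a fully built alternative (middle piece): emit it
--             out.append(pre)
--         elif len(lo) == 1:
--             out.append(pre + [(lo[0], hi[0])])
--         elif lo[0] == hi[0]:
--             stack.append((lo[1:], hi[1:], pre + [(lo[0], lo[0])]))
--         else:
--             n = len(lo)
--             # push high-edge first, middle next, low-edge last (popped in reverse)
--             stack.append(([0x80] * (n - 1), hi[1:], pre + [(hi[0], hi[0])]))
--             if hi[0] > lo[0] + 1:
--                 stack.append(([], [], pre + [(lo[0] + 1, hi[0] - 1)]
--                               + [(0x80, 0xBF)] * (n - 1)))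
--             stack.append((lo[1:], [0xBF] * (n - 1), pre + [(lo[0], lo[0])]))
--     return out
-- ===== Notes on version B (the rewrite author's own statement) =====
-- stated objective: alternative
-- what changed: Replaced the three-way recursion by an iterative depth-first loop over an explicit stack of (lo, hi, prefix) frames, pushed in reverse so alternatives are emitted in the same order.
import Mathlib
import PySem

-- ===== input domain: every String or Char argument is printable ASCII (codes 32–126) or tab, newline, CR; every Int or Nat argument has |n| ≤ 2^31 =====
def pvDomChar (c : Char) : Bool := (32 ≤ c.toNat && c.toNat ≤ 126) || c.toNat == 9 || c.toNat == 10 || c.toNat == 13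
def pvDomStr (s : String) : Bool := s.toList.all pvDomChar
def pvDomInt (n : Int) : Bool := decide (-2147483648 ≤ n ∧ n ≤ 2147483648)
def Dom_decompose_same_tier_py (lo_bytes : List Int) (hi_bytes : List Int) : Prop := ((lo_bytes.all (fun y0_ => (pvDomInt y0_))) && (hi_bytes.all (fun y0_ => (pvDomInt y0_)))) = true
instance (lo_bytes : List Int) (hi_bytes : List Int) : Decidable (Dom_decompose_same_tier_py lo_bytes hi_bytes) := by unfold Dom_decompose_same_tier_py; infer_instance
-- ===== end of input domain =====

-- B replaces A's recursion by an explicit stack of (lo, hi, prefix) frames (iterative DFS,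
-- frames pushed in reverse); same return value on every equal-length nonempty input.

-- ===== PORT A =====
-- literal transliteration of A's recursion; recursion on list structure, the unreachable
-- shapes (empty / unequal-length inputs, excluded by Pre_) return [].
def decompose_same_tier_py (lo_bytes : List Int) (hi_bytes : List Int) : List (List (Int × Int)) :=
  match lo_bytes, hi_bytes with
  | [l0], [h0] => [[(l0, h0)]]
  | l0 :: lt, h0 :: ht =>
    if l0 = h0 then
      (decompose_same_tier_py lt ht).map (fun r => (l0, l0) :: r)
    else
      let n := (l0 :: lt).length
      ((decompose_same_tier_py lt (List.replicate (n - 1) (0xBF : Int))).map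
          (fun r => (l0, l0) :: r))
        ++ (if h0 > l0 + 1 then
              [(l0 + 1, h0 - 1) :: List.replicate (n - 1) ((0x80 : Int), (0xBF : Int))]
            else [])
        ++ ((decompose_same_tier_py (List.replicate (n - 1) (0x80 : Int)) ht).map
              (fun r => (h0, h0) :: r))
  | _, _ => []
termination_by lo_bytes.length
decreasing_by all_goals (simp_all; try omega)

-- ===== PORT B =====
-- the while loop of Source B: stack of frames (lo, hi, prefix), accumulator out.
def pyB_loop (stack : List (List Int × List Int × List (Int × Int)))
    (out : List (List (Int × Int))) : List (List (Int × Int)) :=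
  match stack with
  | [] => out
  | (lo, hi, pre) :: rest =>
    match lo, hi with
    | [], _ => pyB_loop rest (out ++ [pre])
    | [l0], h0 :: _ => pyB_loop rest (out ++ [pre ++ [(l0, h0)]])
    | _ :: _, [] => pyB_loop rest out          -- unreachable: frame lengths stay equal
    | l0 :: l1 :: lt, h0 :: ht =>
      if l0 = h0 then
        pyB_loop ((l1 :: lt, ht, pre ++ [(l0, l0)]) :: rest) out
      else
        let n := (l0 :: l1 :: lt).length
        pyB_loop
          ((l1 :: lt, List.replicate (n - 1) (0xBF : Int), pre ++ [(l0, l0)]) ::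
            ((if h0 > l0 + 1 then
                [(([] : List Int), ([] : List Int),
                  pre ++ [(l0 + 1, h0 - 1)] ++ List.replicate (n - 1) ((0x80 : Int), (0xBF : Int)))]
              else []) ++
              (List.replicate (n - 1) (0x80 : Int), ht, pre ++ [(h0, h0)]) :: rest))
          out
termination_by (stack.map (fun f => 3 ^ f.1.length)).sum
decreasing_by
  all_goals simp_all [pow_succ]
  all_goals split <;> simp [pow_succ] <;>
    nlinarith [pow_pos (by norm_num : (0:ℕ) < 3) lt.length]

def decompose_same_tier_py_alt (lo_bytes : List Int) (hi_bytes : List Int) : List (List (Int × Int)) :=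
  pyB_loop [(lo_bytes, hi_bytes, [])] []

-- ===== PRECONDITION & SPEC =====
-- Pre_ excludes exactly the inputs on which A raises: unequal lengths (AssertionError)
-- and the empty pair (IndexError on lo_bytes[0]).
def Pre_decompose_same_tier_py (lo_bytes : List Int) (hi_bytes : List Int) : Prop :=
  lo_bytes.length = hi_bytes.length ∧ lo_bytes ≠ []
instance (lo_bytes : List Int) (hi_bytes : List Int) : Decidable (Pre_decompose_same_tier_py lo_bytes hi_bytes) := by unfold Pre_decompose_same_tier_py; infer_instance

def pvWitness_decompose_same_tier_py : List Int × List Int := ([0x81, 0x85], [0x93, 0x90])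

def Spec_decompose_same_tier_py (lo_bytes : List Int) (hi_bytes : List Int) (out : List (List (Int × Int))) : Prop := out = decompose_same_tier_py_alt lo_bytes hi_bytes
instance (lo_bytes : List Int) (hi_bytes : List Int) (out : List (List (Int × Int))) : Decidable (Spec_decompose_same_tier_py lo_bytes hi_bytes out) := by unfold Spec_decompose_same_tier_py; infer_instance

-- ===== CLAIM (what is proved, stated in full; the proofs are below) =====
def Claim_equal_decompose_same_tier_py : Prop := ∀ (lo_bytes : List Int) (hi_bytes : List Int), Dom_decompose_same_tier_py lo_bytes hi_bytes → Pre_decompose_same_tier_py lo_bytes hi_bytes → Spec_decompose_same_tier_py lo_bytes hi_bytes (decompose_same_tier_py lo_bytes hi_bytes)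

-- ===== LEMMAS AND PROOFS =====

-- Processing one frame with equal-length nonempty lo/hi appends exactly A's alternatives
-- (each prefixed by `pre`) to the accumulator and continues with the rest of the stack.
theorem pyB_loop_frame : ∀ (n : ℕ) (lo hi : List Int) (pre : List (Int × Int))
    (s : List (List Int × List Int × List (Int × Int))) (out : List (List (Int × Int))),
    lo.length = n → hi.length = n → lo ≠ [] →
    pyB_loop ((lo, hi, pre) :: s) out
      = pyB_loop s (out ++ (decompose_same_tier_py lo hi).map (fun r => pre ++ r)) := by
  intro n
  induction n with
  | zero => intro lo hi pre s out hl _ hne; cases lo <;> simp_all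
  | succ n ih =>
    intro lo hi pre s out hl hh hne
    match lo, hi with
    | [l0], [h0] =>
      rw [pyB_loop, decompose_same_tier_py]; simp
    | l0 :: l1 :: lt, h0 :: h1 :: ht =>
      have hl' : lt.length + 2 = n + 1 := by simpa using hl
      have hh' : ht.length + 2 = n + 1 := by simpa using hh
      rw [pyB_loop]
      by_cases heq : l0 = h0
      · simp only [decompose_same_tier_py, heq, if_true]
        rw [ih (l1 :: lt) (h1 :: ht) (pre ++ [(h0, h0)]) s out (by simp; omega) (by simp; omega)
            (by simp)]
        simp [Function.comp_def]
      · simp only [heq, if_false]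
        rw [ih (l1 :: lt) (List.replicate ((l0 :: l1 :: lt).length - 1) (0xBF : Int))
              (pre ++ [(l0, l0)]) _ out (by simp; omega) (by simp; omega) (by simp)]
        have hhigh := ih (List.replicate ((l0 :: l1 :: lt).length - 1) (0x80 : Int))
              (h1 :: ht) (pre ++ [(h0, h0)]) s
        simp only [decompose_same_tier_py, heq, ite_false]
        by_cases hgt : h0 > l0 + 1
        · simp only [hgt, ite_true, List.singleton_append]
          rw [pyB_loop]
          rw [hhigh _ (by simp; omega) (by simp; omega) (by simp)]
          simp [Function.comp_def, List.append_assoc]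
        · simp only [hgt, ite_false, List.nil_append]
          rw [hhigh _ (by simp; omega) (by simp; omega) (by simp)]
          simp [Function.comp_def, List.append_assoc]
    | l0 :: lt, [] => simp at hh

-- ===== VERDICT (by name: the statement is the Claim_ definition above) =====
theorem decompose_same_tier_py_spec : Claim_equal_decompose_same_tier_py := by
  intro lo hi _ hpre
  unfold Spec_decompose_same_tier_py decompose_same_tier_py_alt
  rw [pyB_loop_frame lo.length lo hi [] [] [] rfl hpre.1.symm hpre.2]
  simp [pyB_loop]
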